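-- pv_equiv track=rewrite | github.com/cszaiti/SDP | vulberta/pattern.py | While2ForReplacePos
-- ===== SOURCE A (Python) =====
-- def _go4match(tokens, startToken, curIdx):
--     endToken = ""
--     if startToken == "(":
--         endToken = ")"
--     elif startToken == "[":
--         endToken = "]"
--     elif startToken == "{":
--         endToken = "}"
--     else:
--         assert False
--
--     indent = 0
--     n = len(tokens)
--     while curIdx < n:
--         if tokens[curIdx] == startToken:
--             indent += 1
--         elif tokens[curIdx] == endToken:
--             indent -= 1
--             if indent == 0:
--                 break
--         curIdx += 1
--     if curIdx == n:
--         return -1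
--     else:
--         return curIdx
--
-- def While2ForReplacePos(tokens, endPoses):
--     pos = []
--     n = len(tokens)
--     for i, t in enumerate(tokens):
--         if t == "while":
--             whileIdx = i
--             conditionEndIdx = _go4match(tokens, "(", whileIdx)
--             if conditionEndIdx + 1 < n and tokens[conditionEndIdx + 1] == ";":   # in case of "do {} while ();"
--                 continue
--             if tokens[conditionEndIdx + 1] == "{":
--                 blockWhileEndIdx = _go4match(tokens, "{", conditionEndIdx)
--             else:
--                 blockWhileEndIdx = endPoses[conditionEndIdx + 1]
--             pos.append([whileIdx, conditionEndIdx, blockWhileEndIdx])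
--     return pos
-- ===== SOURCE B (Python) =====
-- def _match_table(tokens, open_t, close_t):
--     # right-to-left pass: level maps suffix-balance -> nearest close of that level;
--     # ans[k] = index where a _go4match-style scan started at k would stop, else -1
--     n = len(tokens)
--     ans = [-1] * n
--     sb = 0
--     level = {}
--     for k in range(n - 1, -1, -1):
--         t = tokens[k]
--         if t == close_t:
--             level[sb] = k
--             sb -= 1
--         elif t == open_t:
--             sb += 1
--         ans[k] = level.get(sb, -1)
--     return ans
--
-- def While2ForReplacePos(tokens, endPoses):
--     n = len(tokens)
--     parenEnd = _match_table(tokens, "(", ")")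
--     braceEnd = _match_table(tokens, "{", "}")
--     pos = []
--     for i, t in enumerate(tokens):
--         if t != "while":
--             continue
--         c = parenEnd[i]
--         if c + 1 < n and tokens[c + 1] == ";":
--             continue
--         if tokens[c + 1] == "{":
--             b = braceEnd[c]
--         else:
--             b = endPoses[c + 1]
--         pos.append([i, c, b])
--     return pos
-- ===== Notes on version B (the rewrite author's own statement) =====
-- stated objective: alternative
-- what changed: A rescans the token list forward from every 'while' (and again for each brace block); B instead precomputes, in one right-to-left pass per bracket kind, a table giving for every start index where A's scan would stop (via a suffix-balance-level dictionary) and looks each 'while' up in it.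
-- outside the precondition, e.g. on While2ForReplacePos(['{', '}', 'while'], {}): A returns [[2, -1, 1]], B returns [[2, -1, -1]]
import Mathlib
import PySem

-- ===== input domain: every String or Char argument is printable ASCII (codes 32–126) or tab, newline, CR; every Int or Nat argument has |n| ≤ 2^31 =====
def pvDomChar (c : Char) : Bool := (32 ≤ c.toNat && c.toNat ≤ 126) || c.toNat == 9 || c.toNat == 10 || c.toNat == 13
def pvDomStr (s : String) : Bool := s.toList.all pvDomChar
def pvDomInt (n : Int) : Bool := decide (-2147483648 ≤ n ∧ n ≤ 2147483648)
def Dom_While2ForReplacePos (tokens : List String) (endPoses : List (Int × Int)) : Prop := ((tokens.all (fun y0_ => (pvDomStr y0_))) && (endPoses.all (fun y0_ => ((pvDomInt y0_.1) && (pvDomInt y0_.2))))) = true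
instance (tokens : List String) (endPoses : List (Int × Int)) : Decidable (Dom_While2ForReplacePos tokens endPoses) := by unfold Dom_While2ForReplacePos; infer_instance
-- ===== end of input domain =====

-- B replaces A's per-'while' forward bracket scans by two right-to-left precomputed match
-- tables (a suffix-balance-level dictionary) that each 'while' is looked up in; return values
-- agree on Pre_.

-- ===== PORT A =====
-- the 'while curIdx < n' loop of _go4match; fuel = number of indices left before n
def pvGo4Loop (tokens : List String) (startToken endToken : String) : Int → Int → Nat → Int
  | _, _, 0 => -1                        -- curIdx == n: return -1
  | curIdx, indent, fuel + 1 =>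
    let t := (PySem.List.pyGet? tokens curIdx).getD ""
    if t = startToken then pvGo4Loop tokens startToken endToken (curIdx + 1) (indent + 1) fuel
    else if t = endToken then
      (if indent - 1 = 0 then curIdx
       else pvGo4Loop tokens startToken endToken (curIdx + 1) (indent - 1) fuel)
    else pvGo4Loop tokens startToken endToken (curIdx + 1) indent fuel

def pvGo4match (tokens : List String) (startToken : String) (curIdx : Int) : Int :=
  let endToken : String :=
    if startToken = "(" then ")" else if startToken = "[" then "]"
    else if startToken = "{" then "}" else ""   -- 'assert False' is unreachable at A's call sites
  pvGo4Loop tokens startToken endToken curIdx 0 ((PySem.List.len tokens) - curIdx).toNat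

def While2ForReplacePos (tokens : List String) (endPoses : List (Int × Int)) : List (List Int) :=
  let n : Int := PySem.List.len tokens
  (PySem.List.enumerate tokens).foldl (fun pos it =>
    if it.2 = "while" then
      let whileIdx : Int := it.1
      let c := pvGo4match tokens "(" whileIdx
      if c + 1 < n ∧ (PySem.List.pyGet? tokens (c + 1)).getD "" = ";" then pos   -- "do {} while ();"
      else
        let b := if (PySem.List.pyGet? tokens (c + 1)).getD "" = "{"
                 then pvGo4match tokens "{" c
                 else (PySem.Dict.mk endPoses).getD (c + 1) 0
        pos ++ [[whileIdx, c, b]]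
    else pos) []

-- ===== PORT B =====
-- right-to-left pass of Source B's _match_table, processed as structural recursion from the right:
-- returns (suffix balance, level→nearest-close dict, ans table for the suffix starting at index k)
def pvTbl (openT closeT : String) : List String → Int → Int × PySem.Dict Int Int × List Int
  | [], _ => (0, PySem.Dict.empty, [])
  | t :: rest, k =>
    let r := pvTbl openT closeT rest (k + 1)
    let m' := if t = closeT then r.2.1.insert r.1 k else r.2.1
    let sb' := if t = closeT then r.1 - 1 else if t = openT then r.1 + 1 else r.1
    (sb', m', (m'.getD sb' (-1)) :: r.2.2)

def While2ForReplacePos_alt (tokens : List String) (endPoses : List (Int × Int)) : List (List Int) :=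
  let n : Int := PySem.List.len tokens
  let parenEnd := (pvTbl "(" ")" tokens 0).2.2
  let braceEnd := (pvTbl "{" "}" tokens 0).2.2
  (PySem.List.enumerate tokens).foldl (fun pos it =>
    if it.2 ≠ "while" then pos
    else
      let c := (PySem.List.pyGet? parenEnd it.1).getD (-1)
      if c + 1 < n ∧ (PySem.List.pyGet? tokens (c + 1)).getD "" = ";" then pos
      else
        let b := if (PySem.List.pyGet? tokens (c + 1)).getD "" = "{"
                 then (PySem.List.pyGet? braceEnd c).getD (-1)
                 else (PySem.Dict.mk endPoses).getD (c + 1) 0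
        pos ++ [[it.1, c, b]]) []

-- ===== PRECONDITION & SPEC =====
-- closed-form characterisation of "k is the position where A's bracket scan started at j stops":
-- token k is the closing bracket and the open/close counts of the suffixes after j and after k agree
def pvIsM (o c : String) (tokens : List String) (j k : Nat) : Bool :=
  decide (j ≤ k) && decide (k < tokens.length) && (tokens.getD k "" == c) &&
  (((tokens.drop (k + 1)).count o : Int) - ((tokens.drop (k + 1)).count c : Int) ==
   ((tokens.drop j).count o : Int) - ((tokens.drop j).count c : Int))
-- no position matches the '(' scan started at j
def pvNoMatch (tokens : List String) (j : Nat) : Bool :=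
  (List.range tokens.length).all (fun k => !pvIsM "(" ")" tokens j k)
-- k is the first position matching the '(' scan started at j
def pvLeastM (tokens : List String) (j k : Nat) : Bool :=
  pvIsM "(" ")" tokens j k && (List.range k).all (fun k' => !pvIsM "(" ")" tokens j k')

-- Pre_ excludes, for each 'while' at j (k = position of its matching ')', if any):
-- (a) k+1 = len(tokens) or a missing endPoses key, where A raises (IndexError/KeyError); and
-- (b) no matching ')' exists and tokens[0] = "{", where A scans a brace block starting at a negative
--     index (Python wraparound) and B likewise indexes its table at a negative position: both values
--     are accidental and no one would specify either.
def Pre_While2ForReplacePos (tokens : List String) (endPoses : List (Int × Int)) : Prop :=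
  ∀ j ∈ List.range tokens.length, tokens.getD j "" = "while" →
    (pvNoMatch tokens j = true →
       tokens.getD 0 "" ≠ "{" ∧ (tokens.getD 0 "" = ";" ∨ (0 : Int) ∈ endPoses.map Prod.fst)) ∧
    (∀ k ∈ List.range tokens.length, pvLeastM tokens j k = true →
       k + 1 < tokens.length ∧
       (tokens.getD (k + 1) "" = ";" ∨ tokens.getD (k + 1) "" = "{" ∨
        ((k : Int) + 1) ∈ endPoses.map Prod.fst))
instance (tokens : List String) (endPoses : List (Int × Int)) : Decidable (Pre_While2ForReplacePos tokens endPoses) := by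
  unfold Pre_While2ForReplacePos; infer_instance

def pvWitness_While2ForReplacePos : List String × (List (Int × Int)) :=
  (["while", "(", "x", ")", "{", "y", ";", "}"], [])

def Spec_While2ForReplacePos (tokens : List String) (endPoses : List (Int × Int)) (out : List (List Int)) : Prop := out = While2ForReplacePos_alt tokens endPoses
instance (tokens : List String) (endPoses : List (Int × Int)) (out : List (List Int)) : Decidable (Spec_While2ForReplacePos tokens endPoses out) := by unfold Spec_While2ForReplacePos; infer_instance

-- ===== CLAIM (what is proved, stated in full; the proofs are below) =====
def Claim_equal_While2ForReplacePos : Prop := ∀ (tokens : List String) (endPoses : List (Int × Int)), Dom_While2ForReplacePos tokens endPoses → Pre_While2ForReplacePos tokens endPoses → Spec_While2ForReplacePos tokens endPoses (While2ForReplacePos tokens endPoses)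

-- ===== LEMMAS AND PROOFS =====

-- A's scan target, as a structural search (proof-side only)
def pvDelta (openT closeT t : String) : Int := if t = openT then 1 else if t = closeT then -1 else 0
def pvSBal (openT closeT : String) : List String → Int
  | [] => 0
  | t :: rest => pvDelta openT closeT t + pvSBal openT closeT rest
def pvFirstClose (openT closeT : String) : List String → Int → Int → Int
  | [], _, _ => -1
  | t :: rest, k, d =>
    if t = closeT ∧ pvSBal openT closeT rest = d then k
    else pvFirstClose openT closeT rest (k + 1) d
def pvMatch (openT closeT : String) (tokens : List String) (j : Nat) : Int :=
  pvFirstClose openT closeT (tokens.drop j) j (pvSBal openT closeT (tokens.drop j))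

-- A's scan, rephrased as structural recursion on the suffix being scanned
def pvScan (openT closeT : String) : List String → Int → Int → Int
  | [], _, _ => -1
  | t :: rest, k, d =>
    if t = openT then pvScan openT closeT rest (k + 1) (d + 1)
    else if t = closeT then
      (if d - 1 = 0 then k else pvScan openT closeT rest (k + 1) (d - 1))
    else pvScan openT closeT rest (k + 1) d

theorem pvGo4Loop_eq_scan (tokens : List String) (o c : String) :
    ∀ (fuel : Nat) (j : Nat) (d : Int), fuel = tokens.length - j → j ≤ tokens.length →
    pvGo4Loop tokens o c (j : Int) d fuel = pvScan o c (tokens.drop j) (j : Int) d := by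
  intro fuel
  induction fuel with
  | zero =>
    intro j d hf hj
    have hjl : j = tokens.length := by omega
    subst hjl
    simp [pvGo4Loop, List.drop_length, pvScan]
  | succ fuel ih =>
    intro j d hf hj
    have hjlt : j < tokens.length := by omega
    have hdrop : tokens.drop j = tokens[j] :: tokens.drop (j + 1) :=
      List.drop_eq_getElem_cons hjlt
    have hget : (PySem.List.pyGet? tokens (j : Int)).getD "" = tokens[j] := by
      simp [hjlt]
    have hcast : (j : Int) + 1 = ((j + 1 : Nat) : Int) := by push_cast; ring
    have hfuel : fuel = tokens.length - (j + 1) := by omega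
    have hle : j + 1 ≤ tokens.length := by omega
    rw [hdrop]
    simp only [pvGo4Loop, pvScan, hget]
    rw [hcast]
    split
    · exact ih (j + 1) (d + 1) hfuel hle
    · split
      · split <;> first | rfl | exact ih (j + 1) (d - 1) hfuel hle
      · exact ih (j + 1) d hfuel hle

theorem pvScan_eq_firstClose (o c : String) (hne : o ≠ c) :
    ∀ (l : List String) (k d : Int),
    pvScan o c l k d = pvFirstClose o c l k (pvSBal o c l + d) := by
  intro l
  induction l with
  | nil => intro k d; rfl
  | cons t rest ih =>
    intro k d
    have hco : c ≠ o := Ne.symm hne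
    by_cases ho : t = o
    · have hc : ¬ t = c := fun h => hne (ho ▸ h ▸ rfl)
      have hbal : pvSBal o c (t :: rest) = 1 + pvSBal o c rest := by
        simp [pvSBal, pvDelta, ho]
      rw [hbal]
      simp only [pvScan, if_pos ho, ih]
      simp only [pvFirstClose, hc, false_and, if_false]
      ring_nf
    · by_cases hc : t = c
      · have hbal : pvSBal o c (t :: rest) = -1 + pvSBal o c rest := by
          simp [pvSBal, pvDelta, hc, hco]
        rw [hbal]
        simp only [pvScan, if_neg ho, if_pos hc]
        simp only [pvFirstClose, hc, true_and]
        by_cases hd : d - 1 = 0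
        · have h1 : pvSBal o c rest = -1 + pvSBal o c rest + d := by omega
          rw [if_pos hd, if_pos h1]
        · have h1 : ¬ (pvSBal o c rest = -1 + pvSBal o c rest + d) := by omega
          rw [if_neg hd, if_neg h1, ih]
          ring_nf
      · have hbal : pvSBal o c (t :: rest) = pvSBal o c rest := by
          simp [pvSBal, pvDelta, ho, hc]
        rw [hbal]
        simp only [pvScan, if_neg ho, if_neg hc, ih]
        simp only [pvFirstClose, hc, false_and, if_false]

theorem pvTbl_invariant (o c : String) (hne : o ≠ c) :
    ∀ (l : List String) (k : Int),
    (pvTbl o c l k).1 = pvSBal o c l ∧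
    (∀ d, (pvTbl o c l k).2.1.getD d (-1) = pvFirstClose o c l k d) ∧
    (∀ j : Nat, j < l.length →
      (pvTbl o c l k).2.2[j]? =
        some (pvFirstClose o c (l.drop j) (k + j) (pvSBal o c (l.drop j)))) := by
  intro l
  induction l with
  | nil =>
    intro k
    refine ⟨rfl, fun d => ?_, fun j hj => by simp at hj⟩
    simp [pvTbl, PySem.Dict.getD, PySem.Dict.get?, PySem.Dict.empty, pvFirstClose]
  | cons t rest ih =>
    intro k
    obtain ⟨ihsb, ihm, ihans⟩ := ih (k + 1)
    have h2 : ∀ d, (pvTbl o c (t :: rest) k).2.1.getD d (-1) = pvFirstClose o c (t :: rest) k d := by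
      intro d
      show (if t = c then (pvTbl o c rest (k + 1)).2.1.insert (pvTbl o c rest (k + 1)).1 k
            else (pvTbl o c rest (k + 1)).2.1).getD d (-1) = _
      by_cases hc : t = c
      · rw [if_pos hc, ihsb, PySem.Dict.getD_insert]
        simp only [pvFirstClose, hc, true_and]
        by_cases hd : d = pvSBal o c rest
        · rw [if_pos hd, if_pos hd.symm]
        · rw [if_neg hd, if_neg (fun h => hd h.symm), ihm]
      · rw [if_neg hc]
        simp only [pvFirstClose, hc, false_and, if_false]
        exact ihm d
    have h1 : (pvTbl o c (t :: rest) k).1 = pvSBal o c (t :: rest) := by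
      show (if t = c then (pvTbl o c rest (k + 1)).1 - 1
            else if t = o then (pvTbl o c rest (k + 1)).1 + 1 else (pvTbl o c rest (k + 1)).1) = _
      simp only [pvSBal, pvDelta, ihsb]
      by_cases hc : t = c
      · have ho : ¬ t = o := fun h => hne (h.symm.trans hc)
        rw [if_pos hc, if_neg ho, if_pos hc]
        ring
      · by_cases ho : t = o
        · rw [if_neg hc, if_pos ho, if_pos ho]
          ring
        · rw [if_neg hc, if_neg ho, if_neg ho, if_neg hc]
          ring
    refine ⟨h1, h2, ?_⟩
    intro j hj
    match j with
    | 0 =>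
      show some ((pvTbl o c (t :: rest) k).2.1.getD (pvTbl o c (t :: rest) k).1 (-1)) = _
      rw [h2, h1]
      simp
    | j + 1 =>
      have hj' : j < rest.length := by simpa using hj
      show (pvTbl o c rest (k + 1)).2.2[j]? = _
      rw [ihans j hj']
      congr 2
      · push_cast
        ring
theorem pvSBal_counts (o c : String) (hne : o ≠ c) :
    ∀ l : List String, pvSBal o c l = (l.count o : Int) - (l.count c : Int) := by
  intro l
  induction l with
  | nil => simp [pvSBal]
  | cons t rest ih =>
    have hco : ¬ c = o := fun h => hne h.symm
    simp only [pvSBal, pvDelta, ih, List.count_cons, beq_iff_eq]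
    by_cases ho : t = o <;> by_cases hc : t = c
    · exact absurd (ho.symm.trans hc) hne
    · subst ho
      simp only [if_neg hne]
      push_cast
      ring
    · subst hc
      simp only [if_neg hco]
      push_cast
      ring
    · simp only [if_neg ho, if_neg hc]
      push_cast
      ring

-- the scan target characterised without recursion: first index whose token closes at equal suffix balance
theorem pvFC_char (o c : String) :
    ∀ (l : List String) (k : Nat) (d : Int),
    (pvFirstClose o c l (k : Int) d = -1 ↔
      ∀ i, i < l.length → ¬ (l.getD i "" = c ∧ pvSBal o c (l.drop (i + 1)) = d)) ∧
    (pvFirstClose o c l (k : Int) d ≠ -1 →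
      ∃ i, i < l.length ∧ pvFirstClose o c l (k : Int) d = (k : Int) + i ∧
        (l.getD i "" = c ∧ pvSBal o c (l.drop (i + 1)) = d) ∧
        ∀ i', i' < i → ¬ (l.getD i' "" = c ∧ pvSBal o c (l.drop (i' + 1)) = d)) := by
  intro l
  induction l with
  | nil =>
    intro k d
    constructor
    · simp [pvFirstClose]
    · intro h
      exact absurd rfl h
  | cons t rest ih =>
    intro k d
    have hcast : ((k : Int) + 1) = (((k + 1 : Nat)) : Int) := by push_cast; ring
    by_cases h0 : t = c ∧ pvSBal o c rest = d
    · have hfc : pvFirstClose o c (t :: rest) (k : Int) d = (k : Int) := by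
        simp only [pvFirstClose, if_pos h0]
      constructor
      · rw [hfc]
        constructor
        · intro h
          exfalso
          omega
        · intro hall
          exact absurd (by simpa using h0) (hall 0 (by simp))
      · intro _
        exact ⟨0, by simp, by rw [hfc]; simp, by simpa using h0,
          fun i' hi' => absurd hi' (Nat.not_lt_zero _)⟩
    · have hfc : pvFirstClose o c (t :: rest) (k : Int) d =
          pvFirstClose o c rest ((k + 1 : Nat) : Int) d := by
        simp only [pvFirstClose, if_neg h0]
        rw [hcast]
      obtain ⟨ih1, ih2⟩ := ih (k + 1) d
      constructor
      · rw [hfc, ih1]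
        constructor
        · intro hall i hi
          match i with
          | 0 => simpa using h0
          | i + 1 => exact hall i (by simpa using hi)
        · intro hall i hi
          exact hall (i + 1) (by simpa using hi)
      · intro hne
        rw [hfc] at hne ⊢
        obtain ⟨i, hi, heq, hcond, hmin⟩ := ih2 hne
        refine ⟨i + 1, by simpa using hi, ?_, by simpa using hcond, ?_⟩
        · rw [heq]
          push_cast
          ring
        · intro i' hi'
          match i' with
          | 0 => simpa using h0
          | i' + 1 => exact hmin i' (by omega)

-- translation between the per-suffix condition of pvFC_char and the closed-form pvIsM of Pre_
theorem pvCond_iff_isM (o c : String) (hne : o ≠ c) (tokens : List String) (j i : Nat)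
    (hi : i < (tokens.drop j).length) :
    ((tokens.drop j).getD i "" = c ∧
      pvSBal o c ((tokens.drop j).drop (i + 1)) = pvSBal o c (tokens.drop j)) ↔
    pvIsM o c tokens j (j + i) = true := by
  have hlen : j + i < tokens.length := by
    rw [List.length_drop] at hi
    omega
  have hget : (tokens.drop j).getD i "" = tokens.getD (j + i) "" := by
    simp [List.getD, List.getElem?_drop]
  have hdrop : (tokens.drop j).drop (i + 1) = tokens.drop (j + i + 1) := by
    have hadd : j + (i + 1) = j + i + 1 := by omega
    rw [List.drop_drop, hadd]
  rw [hget, hdrop, pvSBal_counts o c hne, pvSBal_counts o c hne]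
  simp only [pvIsM, Bool.and_eq_true, decide_eq_true_eq, beq_iff_eq]
  constructor
  · rintro ⟨h1, h2⟩
    exact ⟨⟨⟨by omega, hlen⟩, h1⟩, by omega⟩
  · rintro ⟨⟨⟨_, _⟩, h1⟩, h2⟩
    exact ⟨h1, by omega⟩

-- A's call with a nonnegative start index computes pvMatch
theorem pvGo4match_eq_pvMatch (tokens : List String) (o c : String) (hne : o ≠ c)
    (hoc : (if o = "(" then ")" else if o = "[" then "]" else if o = "{" then "}" else "") = c)
    (j : Nat) (hj : j ≤ tokens.length) :
    pvGo4match tokens o (j : Int) = pvMatch o c tokens j := by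
  unfold pvGo4match
  rw [hoc]
  have hfuel : ((PySem.List.len tokens) - (j : Int)).toNat = tokens.length - j := by
    rw [PySem.List.len_eq]
    omega
  rw [hfuel, pvGo4Loop_eq_scan tokens o c (tokens.length - j) j 0 rfl hj,
      pvScan_eq_firstClose o c hne, add_zero]
  rfl

-- B's table lookup computes pvMatch
theorem pvTbl_lookup (o c : String) (hne : o ≠ c) (tokens : List String) (j : Nat)
    (hj : j < tokens.length) :
    ((pvTbl o c tokens 0).2.2)[j]? = some (pvMatch o c tokens j) := by
  have h := (pvTbl_invariant o c hne tokens 0).2.2 j hj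
  simpa [pvMatch] using h

-- ===== VERDICT (by name: the statement is the Claim_ definition above) =====
theorem While2ForReplacePos_spec : Claim_equal_While2ForReplacePos := by
  intro tokens endPoses _hdom hpre
  unfold Spec_While2ForReplacePos While2ForReplacePos While2ForReplacePos_alt
  simp only []
  apply PySem.List.foldl_congr_mem
  intro pos it hmem
  obtain ⟨jk, hjk, rfl⟩ := (PySem.List.mem_enumerate_iff _ _ _).mp hmem
  by_cases hw : tokens[jk] = "while"
  · -- the 'while' branch: both sides use the same match index c
    have hwhile : tokens.getD jk "" = "while" := by
      rw [List.getD_eq_getElem?_getD, List.getElem?_eq_getElem hjk]; exact hw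
    have hzero : ((0 : Int) + (jk : Int)) = (jk : Int) := by ring
    have hcA : pvGo4match tokens "(" (jk : Int) = pvMatch "(" ")" tokens jk :=
      pvGo4match_eq_pvMatch tokens "(" ")" (by decide) rfl jk (le_of_lt hjk)
    have hcB : (PySem.List.pyGet? ((pvTbl "(" ")" tokens 0).2.2) (jk : Int)).getD (-1) =
        pvMatch "(" ")" tokens jk := by
      rw [PySem.List.pyGet?_natCast, pvTbl_lookup "(" ")" (by decide) tokens jk hjk]
      rfl
    simp only [hzero, hw, ne_eq, not_true, if_true, if_false,
      hcA, hcB, PySem.List.len_eq]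
    set c := pvMatch "(" ")" tokens jk with hc
    have hpre' := hpre jk (List.mem_range.mpr hjk) hwhile
    by_cases hneg : c = -1
    · -- no matching ')' for this while: Pre_ rules out tokens[0] = "{"
      have hnom : pvNoMatch tokens jk = true := by
        simp only [pvNoMatch, List.all_eq_true, List.mem_range, Bool.not_eq_eq_eq_not,
          Bool.not_true]
        intro k hk
        by_contra hIsM
        have hIsM' : pvIsM "(" ")" tokens jk k = true := by
          revert hIsM
          cases pvIsM "(" ")" tokens jk k <;> simp
        have hjkle : jk ≤ k := by
          have := (Bool.and_eq_true _ _).mp hIsM'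
          have := (Bool.and_eq_true _ _).mp this.1
          have := (Bool.and_eq_true _ _).mp this.1
          exact of_decide_eq_true this.1
        have hi : k - jk < (tokens.drop jk).length := by
          rw [List.length_drop]
          omega
        have hk' : jk + (k - jk) = k := by omega
        have hcond := (pvCond_iff_isM "(" ")" (by decide) tokens jk (k - jk) hi).mpr
          (by rw [hk']; exact hIsM')
        exact ((pvFC_char "(" ")" (tokens.drop jk) jk
          (pvSBal "(" ")" (tokens.drop jk))).1.mp hneg) (k - jk) hi hcond
      obtain ⟨h0ne, _⟩ := hpre'.1 hnom
      have h0 : (PySem.List.pyGet? tokens (c + 1)).getD "" = tokens.getD 0 "" := by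
        rw [hneg]
        norm_num [PySem.List.pyGet?_zero, List.getD_eq_getElem?_getD]
      split_ifs with h1 h2 <;> try rfl
      exact absurd (h0.symm.trans h2) h0ne
    · -- a least match k exists: Pre_ gives k + 1 < len(tokens)
      obtain ⟨i, hi, heq, hcond, hmin⟩ :=
        (pvFC_char "(" ")" (tokens.drop jk) jk (pvSBal "(" ")" (tokens.drop jk))).2 hneg
      have hisM : pvIsM "(" ")" tokens jk (jk + i) = true :=
        (pvCond_iff_isM "(" ")" (by decide) tokens jk i hi).mp hcond
      have hklen : jk + i < tokens.length := by
        rw [List.length_drop] at hi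
        omega
      have hleast : pvLeastM tokens jk (jk + i) = true := by
        simp only [pvLeastM, Bool.and_eq_true, List.all_eq_true, List.mem_range,
          Bool.not_eq_eq_eq_not, Bool.not_true]
        refine ⟨hisM, fun k' hk' => ?_⟩
        by_contra hIsM
        have hIsM' : pvIsM "(" ")" tokens jk k' = true := by
          revert hIsM
          cases pvIsM "(" ")" tokens jk k' <;> simp
        have hjkle : jk ≤ k' := by
          have := (Bool.and_eq_true _ _).mp hIsM'
          have := (Bool.and_eq_true _ _).mp this.1
          have := (Bool.and_eq_true _ _).mp this.1
          exact of_decide_eq_true this.1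
        have hi' : k' - jk < (tokens.drop jk).length := by
          rw [List.length_drop]
          omega
        have hk'' : jk + (k' - jk) = k' := by omega
        have hcond' := (pvCond_iff_isM "(" ")" (by decide) tokens jk (k' - jk) hi').mpr
          (by rw [hk'']; exact hIsM')
        exact hmin (k' - jk) (by omega) hcond'
      obtain ⟨hltN, _⟩ := hpre'.2 (jk + i) (List.mem_range.mpr hklen) hleast
      have hcv : c = (((jk + i : Nat)) : Int) := by
        rw [hc, pvMatch, heq]
        push_cast
        ring
      have hA : pvGo4match tokens "{" c = pvMatch "{" "}" tokens c.toNat := by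
        rw [hcv]
        exact pvGo4match_eq_pvMatch tokens "{" "}" (by decide) rfl (jk + i) (by omega)
      have hB : (PySem.List.pyGet? ((pvTbl "{" "}" tokens 0).2.2) c).getD (-1) =
          pvMatch "{" "}" tokens c.toNat := by
        rw [hcv, PySem.List.pyGet?_natCast,
            pvTbl_lookup "{" "}" (by decide) tokens (jk + i) (by omega)]
        rfl
      split_ifs with h1 h2 <;> try rfl
      rw [hA, hB]
  · simp [hw]
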